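-- pv_equiv track=rewrite | github.com/frogEUN/study | programmersSchool.py | solution
-- ===== SOURCE A (Python) =====
-- def solution(a, b, c, d):
--     score = 0
--     if a == b == c == d:
--         score += 1111 * a
--     elif a == b == c:
--         score += (10 * a + d)**2
--     elif a == b == d:
--         score += (10 * a + c)**2
--     elif a == c == d:
--         score += (10 * a + b) ** 2
--     elif b == c == d:
--         score += (10 * b + a) ** 2
--     elif a == b and c == d:
--         score += (a + c) * abs(a - c)
--     elif a == c and b == d:
--         score += (a + b) * abs(a - b)
--     elif a == d and b == c:
--         score += (a + c) * abs(a - c)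
--     elif a == b:
--         score += c * d
--     elif a == c:
--         score += b * d
--     elif a == d:
--         score += b * c
--     elif b == c:
--         score += a * d
--     elif b == d:
--         score += a * c
--     elif c == d:
--         score += a * b
--     else:
--         small = a
--         for n in (b, c, d):
--             if n < small:
--                 small = n
--         score += small
--     return score
-- ===== SOURCE B (Python) =====
-- def solution(a, b, c, d):
--     cnt = {}
--     for v in (a, b, c, d):
--         cnt[v] = cnt.get(v, 0) + 1
--     sig = sorted(cnt.values(), reverse=True)
--     if sig == [4]:
--         return 1111 * a
--     if sig == [3, 1]:
--         t = next(v for v in cnt if cnt[v] == 3)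
--         s = next(v for v in cnt if cnt[v] == 1)
--         return (10 * t + s) ** 2
--     if sig == [2, 2]:
--         p, q = cnt
--         return (p + q) * abs(p - q)
--     if sig == [2, 1, 1]:
--         x, y = (v for v in cnt if cnt[v] == 1)
--         return x * y
--     return min(a, b, c, d)
-- ===== Notes on version B (the rewrite author's own statement) =====
-- stated objective: idiomatic
-- what changed: Replaces A's 15-branch chain of positional equality comparisons with a Counter of the four values and branching on the sorted multiplicity signature ([4],[3,1],[2,2],[2,1,1], else min).
import Mathlib
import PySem

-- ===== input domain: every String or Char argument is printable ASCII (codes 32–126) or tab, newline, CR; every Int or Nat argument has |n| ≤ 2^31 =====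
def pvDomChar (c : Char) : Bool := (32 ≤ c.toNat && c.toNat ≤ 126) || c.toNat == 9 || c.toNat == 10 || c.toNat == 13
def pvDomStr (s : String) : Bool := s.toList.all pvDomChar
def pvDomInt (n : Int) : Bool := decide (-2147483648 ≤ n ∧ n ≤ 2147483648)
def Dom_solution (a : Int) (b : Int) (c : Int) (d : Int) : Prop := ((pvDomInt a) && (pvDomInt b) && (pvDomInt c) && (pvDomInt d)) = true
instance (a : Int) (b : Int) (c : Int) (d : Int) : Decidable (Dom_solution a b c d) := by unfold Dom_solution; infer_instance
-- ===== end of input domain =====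

-- B derives the score from the multiset of value multiplicities (a counter and its sorted
-- count signature) instead of A's chain of positional equality comparisons (objective: idiomatic).


-- ===== PORT A =====
def solution (a : Int) (b : Int) (c : Int) (d : Int) : Int :=
  let score : Int := 0
  if a = b ∧ b = c ∧ c = d then score + 1111 * a
  else if a = b ∧ b = c then score + (10 * a + d) ^ 2
  else if a = b ∧ b = d then score + (10 * a + c) ^ 2
  else if a = c ∧ c = d then score + (10 * a + b) ^ 2
  else if b = c ∧ c = d then score + (10 * b + a) ^ 2
  else if a = b ∧ c = d then score + (a + c) * |a - c|
  else if a = c ∧ b = d then score + (a + b) * |a - b|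
  else if a = d ∧ b = c then score + (a + c) * |a - c|
  else if a = b then score + c * d
  else if a = c then score + b * d
  else if a = d then score + b * c
  else if b = c then score + a * d
  else if b = d then score + a * c
  else if c = d then score + a * b
  else
    -- small = a; for n in (b, c, d): if n < small: small = n
    let small := [b, c, d].foldl (fun small n => if n < small then n else small) a
    score + small

-- ===== PORT B =====
def solution_alt (a : Int) (b : Int) (c : Int) (d : Int) : Int :=
  let cnt : PySem.Dict Int Int :=
    [a, b, c, d].foldl (fun cnt v => cnt.insert v (cnt.getD v 0 + 1)) PySem.Dict.empty
  let sig := PySem.List.sorted cnt.values (fun x => x) true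
  if sig = [4] then 1111 * a
  else if sig = [3, 1] then
    let t := (cnt.keys.filter (fun v => cnt.getD v 0 == 3)).headD 0
    let s := (cnt.keys.filter (fun v => cnt.getD v 0 == 1)).headD 0
    (10 * t + s) ^ 2
  else if sig = [2, 2] then
    match cnt.keys with
    | [p, q] => (p + q) * |p - q|
    | _ => 0   -- unreachable: signature [2,2] has exactly two keys
  else if sig = [2, 1, 1] then
    match cnt.keys.filter (fun v => cnt.getD v 0 == 1) with
    | [x, y] => x * y
    | _ => 0   -- unreachable: signature [2,1,1] has exactly two count-1 keys
  else (PySem.List.min? [a, b, c, d] (fun x => x)).getD 0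

-- ===== PRECONDITION & SPEC =====
def Spec_solution (a : Int) (b : Int) (c : Int) (d : Int) (out : Int) : Prop := out = solution_alt a b c d
instance (a : Int) (b : Int) (c : Int) (d : Int) (out : Int) : Decidable (Spec_solution a b c d out) := by unfold Spec_solution; infer_instance

-- ===== CLAIM (what is proved, stated in full; the proofs are below) =====
def Claim_equal_solution : Prop := ∀ (a : Int) (b : Int) (c : Int) (d : Int), Dom_solution a b c d → Spec_solution a b c d (solution a b c d)

-- ===== LEMMAS AND PROOFS =====

-- ===== VERDICT (by name: the statement is the Claim_ definition above) =====
theorem solution_spec : Claim_equal_solution := by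
  intro a b c d _
  unfold Spec_solution solution solution_alt
  by_cases hab : a = b <;> by_cases hac : a = c <;> by_cases had : a = d <;>
    by_cases hbc : b = c <;> by_cases hbd : b = d <;> by_cases hcd : c = d <;>
    subst_eqs <;>
    simp_all [PySem.Dict.insert, PySem.Dict.getD, PySem.Dict.get?, PySem.Dict.empty,
      PySem.Dict.keys, PySem.Dict.values, PySem.Dict.contains, PySem.List.sorted, PySem.List.insertBy, PySem.List.min?_id_cons] <;>
    omega
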